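-- pv_equiv track=rewrite | github.com/KareemAlaa2001/GCNUserClassifier | src/generalised/lib/stackoverflowproc/labelBuilder.py | getMulticlassLabelsFromNiceQA
-- ===== SOURCE A (Python) =====
-- def getMulticlassLabelsFromNiceQA(niceQuestionUsers, niceAnswerUsers, users, indexGuide):
--     both = (set(niceAnswerUsers.keys()) & set( niceQuestionUsers.keys()))
--     userLabels = {}
--
--     for user in users:
--         userindex = indexGuide['user'][user.get('Id')]
--
--         if userindex in both:
--             userLabels[userindex] = [0,0,0,1]
--
--         elif userindex in niceAnswerUsers:
--             userLabels[userindex] = [0,0,1,0]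
--
--         elif userindex in niceQuestionUsers:
--             userLabels[userindex] = [0,1,0,0]
--
--         else:
--             userLabels[userindex] = [1,0,0,0]
--
--     return userLabels
-- ===== SOURCE B (Python) =====
-- def getMulticlassLabelsFromNiceQA(niceQuestionUsers, niceAnswerUsers, users, indexGuide):
--     # Stage 1: build a label table for all "nice" users up front.
--     labelOf = {}
--     for u in niceQuestionUsers:
--         labelOf[u] = [0, 1, 0, 0]
--     for u in niceAnswerUsers:
--         labelOf[u] = [0, 0, 0, 1] if u in niceQuestionUsers else [0, 0, 1, 0]
--     # Stage 2: one get-with-default per user; no membership tests, no branching.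
--     userLabels = {}
--     for user in users:
--         userindex = indexGuide['user'][user.get('Id')]
--         userLabels[userindex] = list(labelOf.get(userindex, [1, 0, 0, 0]))
--     return userLabels
-- ===== Notes on version B (the rewrite author's own statement) =====
-- stated objective: alternative
-- what changed: B precomputes a label lookup table in two staged passes over the nice-question and nice-answer dicts (the answer pass upgrading shared users to the 'both' label), so the per-user loop is a single dict.get with a default instead of A's intersection set plus 4-way if/elif ladder of membership tests.
import Mathlib
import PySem

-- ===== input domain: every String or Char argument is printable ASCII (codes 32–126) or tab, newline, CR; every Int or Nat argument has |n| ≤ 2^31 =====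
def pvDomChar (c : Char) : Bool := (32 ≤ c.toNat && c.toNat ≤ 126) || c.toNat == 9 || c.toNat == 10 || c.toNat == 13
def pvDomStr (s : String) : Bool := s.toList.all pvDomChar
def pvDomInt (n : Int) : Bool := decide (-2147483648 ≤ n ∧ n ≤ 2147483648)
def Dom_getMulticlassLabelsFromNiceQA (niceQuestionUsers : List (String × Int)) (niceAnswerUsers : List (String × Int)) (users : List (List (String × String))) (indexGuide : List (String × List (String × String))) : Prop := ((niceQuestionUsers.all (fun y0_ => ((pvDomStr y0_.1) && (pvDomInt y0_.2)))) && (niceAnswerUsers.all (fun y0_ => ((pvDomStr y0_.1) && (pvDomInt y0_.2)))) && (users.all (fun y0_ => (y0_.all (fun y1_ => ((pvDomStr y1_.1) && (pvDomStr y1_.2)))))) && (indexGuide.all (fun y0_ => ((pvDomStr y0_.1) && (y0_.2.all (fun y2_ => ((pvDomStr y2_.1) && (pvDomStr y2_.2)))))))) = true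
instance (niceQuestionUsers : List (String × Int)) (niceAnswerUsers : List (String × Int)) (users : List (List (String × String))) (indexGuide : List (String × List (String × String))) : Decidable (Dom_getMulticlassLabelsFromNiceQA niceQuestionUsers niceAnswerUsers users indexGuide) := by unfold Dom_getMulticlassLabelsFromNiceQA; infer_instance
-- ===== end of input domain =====

-- B replaces A's per-user 4-way ladder (intersection set + membership tests) by a label table
-- built in two staged passes over the nice dicts, leaving a single get-with-default per user
-- (objective: alternative).

-- ===== PORT A =====
-- A's 4-way branch on the user's index (the `both` set first, then the two dicts, then the default)
def pvLabelA (both : PySem.Set String) (niceAnswerUsers niceQuestionUsers : PySem.Dict String Int) (userindex : String) : List Int :=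
  if both.contains userindex then [0, 0, 0, 1]
  else if niceAnswerUsers.contains userindex then [0, 0, 1, 0]
  else if niceQuestionUsers.contains userindex then [0, 1, 0, 0]
  else [1, 0, 0, 0]

def getMulticlassLabelsFromNiceQA (niceQuestionUsers : List (String × Int)) (niceAnswerUsers : List (String × Int)) (users : List (List (String × String))) (indexGuide : List (String × List (String × String))) : List (String × List Int) :=
  let na := PySem.Dict.mk niceAnswerUsers
  let nq := PySem.Dict.mk niceQuestionUsers
  let both : PySem.Set String := PySem.Set.inter (PySem.Set.ofList na.keys) (PySem.Set.ofList nq.keys)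
  (users.foldl (fun (userLabels : PySem.Dict String (List Int)) user =>
      -- userindex = indexGuide['user'][user.get('Id')] (Pre_ guarantees both lookups succeed; the getD defaults are never used under Pre_)
      let guide := PySem.Dict.mk (((PySem.Dict.mk indexGuide).get? "user").getD [])
      let userindex := (guide.get? (((PySem.Dict.mk user).get? "Id").getD "")).getD ""
      userLabels.insert userindex (pvLabelA both na nq userindex))
    PySem.Dict.empty).items

-- ===== PORT B =====
def getMulticlassLabelsFromNiceQA_alt (niceQuestionUsers : List (String × Int)) (niceAnswerUsers : List (String × Int)) (users : List (List (String × String))) (indexGuide : List (String × List (String × String))) : List (String × List Int) :=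
  let nq := PySem.Dict.mk niceQuestionUsers
  let na := PySem.Dict.mk niceAnswerUsers
  -- stage 1: label table (first the question pass, then the answer pass that upgrades shared users)
  let labelOf0 := nq.keys.foldl (fun (d : PySem.Dict String (List Int)) u => d.insert u [0, 1, 0, 0]) PySem.Dict.empty
  let labelOf := na.keys.foldl (fun (d : PySem.Dict String (List Int)) u => d.insert u (if nq.contains u then [0, 0, 0, 1] else [0, 0, 1, 0])) labelOf0
  -- stage 2: one lookup with default per user
  (users.foldl (fun (userLabels : PySem.Dict String (List Int)) user =>
      let userindex := ((PySem.Dict.mk (((PySem.Dict.mk indexGuide).get? "user").getD [])).get? (((PySem.Dict.mk user).get? "Id").getD "")).getD ""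
      userLabels.insert userindex ((labelOf.get? userindex).getD [1, 0, 0, 0]))
    PySem.Dict.empty).items

-- ===== PRECONDITION & SPEC =====
-- Pre_ excludes exactly the inputs where Python A raises KeyError: indexGuide without a
-- 'user' key, a user dict without an 'Id' key, or an Id absent from indexGuide['user'].
def Pre_getMulticlassLabelsFromNiceQA (niceQuestionUsers : List (String × Int)) (niceAnswerUsers : List (String × Int)) (users : List (List (String × String))) (indexGuide : List (String × List (String × String))) : Prop :=
  (users.all (fun user =>
        (PySem.Dict.mk indexGuide).contains "user" &&
        (((PySem.Dict.mk user).get? "Id").map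
          (fun id => (PySem.Dict.mk (((PySem.Dict.mk indexGuide).get? "user").getD [])).contains id)).getD false)) = true
instance (niceQuestionUsers : List (String × Int)) (niceAnswerUsers : List (String × Int)) (users : List (List (String × String))) (indexGuide : List (String × List (String × String))) : Decidable (Pre_getMulticlassLabelsFromNiceQA niceQuestionUsers niceAnswerUsers users indexGuide) := by unfold Pre_getMulticlassLabelsFromNiceQA; infer_instance

def pvWitness_getMulticlassLabelsFromNiceQA : (List (String × Int)) × (List (String × Int)) × (List (List (String × String))) × (List (String × List (String × String))) :=
  ([("u1", 5)], [("u2", 3)], [[("Id", "a")], [("Id", "b")]], [("user", [("a", "u1"), ("b", "u2")])])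

def Spec_getMulticlassLabelsFromNiceQA (niceQuestionUsers : List (String × Int)) (niceAnswerUsers : List (String × Int)) (users : List (List (String × String))) (indexGuide : List (String × List (String × String))) (out : List (String × List Int)) : Prop := out = getMulticlassLabelsFromNiceQA_alt niceQuestionUsers niceAnswerUsers users indexGuide
instance (niceQuestionUsers : List (String × Int)) (niceAnswerUsers : List (String × Int)) (users : List (List (String × String))) (indexGuide : List (String × List (String × String))) (out : List (String × List Int)) : Decidable (Spec_getMulticlassLabelsFromNiceQA niceQuestionUsers niceAnswerUsers users indexGuide out) := by unfold Spec_getMulticlassLabelsFromNiceQA; infer_instance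

-- ===== CLAIM (what is proved, stated in full; the proofs are below) =====
def Claim_equal_getMulticlassLabelsFromNiceQA : Prop := ∀ (niceQuestionUsers : List (String × Int)) (niceAnswerUsers : List (String × Int)) (users : List (List (String × String))) (indexGuide : List (String × List (String × String))), Dom_getMulticlassLabelsFromNiceQA niceQuestionUsers niceAnswerUsers users indexGuide → Pre_getMulticlassLabelsFromNiceQA niceQuestionUsers niceAnswerUsers users indexGuide → Spec_getMulticlassLabelsFromNiceQA niceQuestionUsers niceAnswerUsers users indexGuide (getMulticlassLabelsFromNiceQA niceQuestionUsers niceAnswerUsers users indexGuide)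

-- ===== LEMMAS AND PROOFS =====
-- a fold of inserts whose value depends only on the key: last write wins, value is f x
theorem pv_get?_foldl_insert (l : List String) (f : String → List Int) (d : PySem.Dict String (List Int)) (x : String) :
    (l.foldl (fun d u => d.insert u (f u)) d).get? x
      = if x ∈ l then some (f x) else d.get? x := by
  induction l generalizing d with
  | nil => simp
  | cons h t ih =>
    simp only [List.foldl_cons, ih, List.mem_cons]
    by_cases hx : x ∈ t
    · simp [hx]
    · by_cases hxh : x = h
      · subst hxh; simp [hx, PySem.Dict.get?_insert_self]
      · simp [hx, hxh, PySem.Dict.get?_insert_of_ne _ _ hxh]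

-- membership in A's `both` set = membership in both dicts
theorem pv_both_contains (na nq : PySem.Dict String Int) (x : String) :
    (PySem.Set.inter (PySem.Set.ofList na.keys) (PySem.Set.ofList nq.keys)).contains x
      = (na.contains x && nq.contains x) := by
  by_cases hna : na.contains x = true <;> by_cases hnq : nq.contains x = true <;>
    simp_all [PySem.Set.mem_inter, PySem.Set.mem_ofList,
      PySem.Dict.contains_iff_mem_keys, Bool.eq_false_iff]

-- per-user: B's staged label table looked up with default equals A's 4-way ladder
theorem pv_label_eq (na nq : PySem.Dict String Int) (x : String) :
    ((na.keys.foldl (fun (d : PySem.Dict String (List Int)) u =>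
          d.insert u (if nq.contains u then [0, 0, 0, 1] else [0, 0, 1, 0]))
        (nq.keys.foldl (fun (d : PySem.Dict String (List Int)) u => d.insert u [0, 1, 0, 0])
          PySem.Dict.empty)).get? x).getD [1, 0, 0, 0]
      = pvLabelA (PySem.Set.inter (PySem.Set.ofList na.keys) (PySem.Set.ofList nq.keys)) na nq x := by
  unfold pvLabelA
  rw [pv_both_contains,
    pv_get?_foldl_insert na.keys (fun u => if nq.contains u then [0, 0, 0, 1] else [0, 0, 1, 0]),
    pv_get?_foldl_insert nq.keys (fun _ => [0, 1, 0, 0])]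
  by_cases hna : na.contains x = true <;> by_cases hnq : nq.contains x = true <;>
    simp_all [PySem.Dict.contains_iff_mem_keys, Bool.eq_false_iff, PySem.Dict.get?_empty]

-- ===== VERDICT (by name: the statement is the Claim_ definition above) =====
theorem getMulticlassLabelsFromNiceQA_spec : Claim_equal_getMulticlassLabelsFromNiceQA := by
  intro nq na users ig _ _
  unfold Spec_getMulticlassLabelsFromNiceQA
  unfold getMulticlassLabelsFromNiceQA getMulticlassLabelsFromNiceQA_alt
  simp only []
  congr 1
  apply PySem.List.foldl_congr_mem
  intro acc user _
  rw [pv_label_eq]
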